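-- pv_equiv track=rewrite | github.com/qwert2009/pds-ultimate | agent/pds_ultimate/core/persona_engine.py | _extract_phrases
-- ===== SOURCE A (Python) =====
-- def _extract_phrases(tokens: list[str]) -> list[str]:
--     phrases: list[str] = []
--     if len(tokens) < 4:
--         return phrases
--     for size in (2, 3, 4, 5):
--         for i in range(len(tokens) - size + 1):
--             chunk = tokens[i:i + size]
--             if all(len(w) > 1 for w in chunk):
--                 phrases.append(" ".join(chunk))
--     return phrases
-- ===== SOURCE B (Python) =====
-- def _extract_phrases(tokens: list[str]) -> list[str]:
--     if len(tokens) < 4: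
--         return []
--     # one pass: maximal runs of consecutive valid tokens (len > 1)
--     segments: list[list[str]] = []
--     cur: list[str] = []
--     for w in tokens:
--         if len(w) > 1:
--             cur.append(w)
--         elif cur:
--             segments.append(cur)
--             cur = []
--     if cur:
--         segments.append(cur)
--     phrases: list[str] = []
--     for size in (2, 3, 4, 5):
--         for seg in segments:
--             for j in range(len(seg) - size + 1):
--                 phrases.append(" ".join(seg[j:j + size]))
--     return phrases
-- ===== Notes on version B (the rewrite author's own statement) =====
-- stated objective: faster
-- what changed: B first computes the maximal runs of consecutive valid tokens (len>1) in a single pass, then for each size emits every window lying inside a run directly, instead of re-checking validity of every window of the whole list with all() for each size.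
import Mathlib
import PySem

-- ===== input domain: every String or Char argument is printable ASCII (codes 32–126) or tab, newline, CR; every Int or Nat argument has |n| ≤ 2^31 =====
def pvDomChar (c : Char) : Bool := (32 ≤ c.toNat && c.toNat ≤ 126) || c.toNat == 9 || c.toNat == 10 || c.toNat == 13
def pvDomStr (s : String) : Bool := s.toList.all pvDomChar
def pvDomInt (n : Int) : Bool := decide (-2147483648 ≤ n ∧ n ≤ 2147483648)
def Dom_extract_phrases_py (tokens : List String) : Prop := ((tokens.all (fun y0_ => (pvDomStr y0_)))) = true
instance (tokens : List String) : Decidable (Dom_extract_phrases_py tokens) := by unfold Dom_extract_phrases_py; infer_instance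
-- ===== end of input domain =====

-- B replaces A's per-window `all()` validity rescans by one pass that finds the maximal runs of
-- consecutive valid tokens and then emits every window inside each run (objective: faster, constant factor).

-- ===== PORT A =====
-- `len(w) > 1` — the token-validity test both Pythons share
def pvValidTok (w : String) : Bool := decide (1 < PySem.Str.len w)

def extract_phrases_py (tokens : List String) : List String :=
  let phrases : List String := []
  if PySem.List.len tokens < 4 then phrases
  else
    [(2 : Int), 3, 4, 5].foldl (fun phrases size =>
      (PySem.List.pyRange 0 (PySem.List.len tokens - size + 1) 1).foldl (fun phrases i =>
        let chunk := PySem.List.slice tokens (some i) (some (i + size))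
        if chunk.all pvValidTok then phrases ++ [PySem.Str.join " " chunk] else phrases)
        phrases)
      phrases

-- ===== PORT B =====
def extract_phrases_py_alt (tokens : List String) : List String :=
  if PySem.List.len tokens < 4 then []
  else
    let p := tokens.foldl (fun (acc : List (List String) × List String) w =>
      if pvValidTok w then (acc.1, acc.2 ++ [w])
      else if acc.2 ≠ [] then (acc.1 ++ [acc.2], ([] : List String))
      else acc) (([] : List (List String)), ([] : List String))
    let segments := if p.2 ≠ [] then p.1 ++ [p.2] else p.1
    [(2 : Int), 3, 4, 5].foldl (fun phrases size =>
      segments.foldl (fun phrases seg =>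
        (PySem.List.pyRange 0 (PySem.List.len seg - size + 1) 1).foldl (fun phrases j =>
          phrases ++ [PySem.Str.join " " (PySem.List.slice seg (some j) (some (j + size)))])
          phrases)
        phrases)
      []

-- ===== PRECONDITION & SPEC =====
def Spec_extract_phrases_py (tokens : List String) (out : List String) : Prop := out = extract_phrases_py_alt tokens
instance (tokens : List String) (out : List String) : Decidable (Spec_extract_phrases_py tokens out) := by unfold Spec_extract_phrases_py; infer_instance

-- ===== CLAIM (what is proved, stated in full; the proofs are below) =====
def Claim_equal_extract_phrases_py : Prop := ∀ (tokens : List String), Dom_extract_phrases_py tokens → Spec_extract_phrases_py tokens (extract_phrases_py tokens)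

-- ===== LEMMAS AND PROOFS =====

-- the list of all windows of size s of l, left to right
def pvWins (l : List String) (s : Nat) : List (List String) :=
  (List.range (l.length + 1 - s)).map (fun j => (l.drop j).take s)

-- A's valid windows of size s, left to right
def pvChunksA (l : List String) (s : Nat) : List (List String) :=
  (pvWins l s).filter (fun c => c.all pvValidTok)

-- maximal runs of consecutive valid tokens, left to right (proof-side spec of B's first pass)
def pvSegs : List String → List (List String)
  | [] => []
  | w :: ws =>
    if pvValidTok w then (w :: ws.takeWhile pvValidTok) :: pvSegs (ws.dropWhile pvValidTok)
    else pvSegs ws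
termination_by l => l.length
decreasing_by
  · simpa using Nat.lt_succ_of_le (List.length_dropWhile_le _ _)
  · simp

-- unrolled meaning of B's segment-building fold, with pending run `cur`
def pvSegsPre (cur : List String) : List String → List (List String)
  | [] => if cur ≠ [] then [cur] else []
  | w :: ws =>
    if pvValidTok w then pvSegsPre (cur ++ [w]) ws
    else (if cur ≠ [] then [cur] else []) ++ pvSegsPre [] ws

lemma pvFold_segs (l : List String) (done : List (List String)) (cur : List String) :
    (let r := l.foldl (fun (acc : List (List String) × List String) w =>
        if pvValidTok w then (acc.1, acc.2 ++ [w])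
        else if acc.2 ≠ [] then (acc.1 ++ [acc.2], ([] : List String))
        else acc) (done, cur);
      if r.2 ≠ [] then r.1 ++ [r.2] else r.1) = done ++ pvSegsPre cur l := by
  induction l generalizing done cur with
  | nil => simp [pvSegsPre]; split_ifs <;> simp
  | cons w ws ih =>
    simp only [List.foldl_cons, pvSegsPre]
    by_cases hw : pvValidTok w
    · simpa [hw] using ih done (cur ++ [w])
    · by_cases hc : cur = []
      · simpa [hw, hc] using ih done []
      · simpa [hw, hc, List.append_assoc] using ih (done ++ [cur]) []

lemma pvSegsPre_spec (l : List String) :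
    pvSegsPre [] l = pvSegs l ∧
      ∀ cur : List String, cur ≠ [] →
        pvSegsPre cur l = (cur ++ l.takeWhile pvValidTok) :: pvSegs (l.dropWhile pvValidTok) := by
  induction l with
  | nil => exact ⟨by simp [pvSegsPre, pvSegs], fun cur hc => by simp [pvSegsPre, hc, pvSegs]⟩
  | cons w ws ih =>
    by_cases hw : pvValidTok w
    · constructor
      · rw [pvSegsPre, if_pos hw, List.nil_append, (ih.2 [w] (by simp)), pvSegs, if_pos hw]
        simp
      · intro cur hc
        rw [pvSegsPre, if_pos hw, ih.2 (cur ++ [w]) (by simp),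
          List.takeWhile_cons_of_pos hw, List.dropWhile_cons_of_pos hw]
        simp
    · constructor
      · rw [pvSegsPre, if_neg hw, ih.1, pvSegs, if_neg hw]
        simp
      · intro cur hc
        rw [pvSegsPre, if_neg hw, ih.1,
          List.takeWhile_cons_of_neg hw, List.dropWhile_cons_of_neg hw, pvSegs, if_neg hw]
        simp [hc]

-- window-list step lemma
lemma pvWins_cons (w : String) (t : List String) (s : Nat) :
    pvWins (w :: t) s =
      (if s ≤ t.length + 1 then [(w :: t).take s] else []) ++ pvWins t s := by
  by_cases h : s ≤ t.length + 1
  · have hlen : (w :: t).length + 1 - s = (t.length + 1 - s) + 1 := by simp; omega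
    rw [pvWins, hlen, List.range_succ_eq_map, if_pos h]
    simp [pvWins, List.map_map, Function.comp_def]
  · have h1 : (w :: t).length + 1 - s = 0 := by simp; omega
    have h2 : t.length + 1 - s = 0 := by omega
    simp [pvWins, h2, if_neg h]
    omega

lemma pvChunksA_cons (w : String) (t : List String) (s : Nat) :
    pvChunksA (w :: t) s =
      (if s ≤ t.length + 1 ∧ ((w :: t).take s).all pvValidTok then [(w :: t).take s] else [])
        ++ pvChunksA t s := by
  rw [pvChunksA, pvWins_cons, List.filter_append]
  have : List.filter (fun c => c.all pvValidTok) (if s ≤ t.length + 1 then [(w :: t).take s] else [])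
      = (if s ≤ t.length + 1 ∧ ((w :: t).take s).all pvValidTok then [(w :: t).take s] else []) := by
    by_cases hA : s ≤ t.length + 1 <;>
      by_cases hB : ((w :: t).take s).all pvValidTok <;>
        simp [hA, hB, List.filter]
  rw [this]; rfl

-- splitting lemma: a valid run followed by an invalid-headed rest
lemma pvSplit (g rest : List String) (s : Nat) (hs : 1 ≤ s)
    (hg : ∀ x ∈ g, pvValidTok x = true)
    (hr : rest = [] ∨ ∃ r rs, rest = r :: rs ∧ pvValidTok r = false) :
    pvChunksA (g ++ rest) s = pvWins g s ++ pvChunksA rest s := by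
  induction g with
  | nil =>
    have : pvWins [] s = [] := by simp [pvWins, Nat.sub_eq_zero_of_le hs]
    simp [this]
  | cons w g' ih =>
    have ih' := ih (fun x hx => hg x (List.mem_cons_of_mem _ hx))
    rw [List.cons_append, pvChunksA_cons, ih', pvWins_cons, List.append_assoc]
    congr 1
    by_cases h : s ≤ g'.length + 1
    · have hle : s ≤ (w :: g').length := by simp; omega
      have htake : (w :: (g' ++ rest)).take s = (w :: g').take s := by
        simpa using List.take_append_of_le_length (l₁ := w :: g') (l₂ := rest) hle
      have hC1 : s ≤ (g' ++ rest).length + 1 ∧ ((w :: (g' ++ rest)).take s).all pvValidTok = true := by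
        refine ⟨by simp; omega, ?_⟩
        rw [htake, List.all_eq_true]
        intro x hx
        exact hg x (List.mem_of_mem_take hx)
      rw [if_pos hC1, if_pos h, htake]
    · rw [if_neg h, if_neg]
      rintro ⟨hlen, hall⟩
      rcases hr with hnil | ⟨r, rs, hrest, hrinv⟩
      · subst hnil
        simp at hlen
        omega
      · subst hrest
        have hmem : r ∈ ((w :: g') ++ r :: rs).take s := by
          rw [List.take_append]
          have h1 : 1 ≤ s - (w :: g').length := by simp; omega
          refine List.mem_append_right _ ?_
          rcases Nat.exists_eq_add_of_le h1 with ⟨k, hk⟩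
          have h2 : s - (w :: g').length = k + 1 := by omega
          rw [h2, List.take_succ_cons]
          exact List.mem_cons_self
        rw [List.all_eq_true] at hall
        have := hall r (by simpa using hmem)
        rw [hrinv] at this; exact Bool.false_ne_true this

-- main lemma: A's valid windows are exactly the windows inside the runs, in order
lemma pvMain (l : List String) (s : Nat) (hs : 1 ≤ s) :
    pvChunksA l s = (pvSegs l).flatMap (fun g => pvWins g s) := by
  induction l using pvSegs.induct with
  | case1 => simp [pvChunksA, pvWins, pvSegs, Nat.sub_eq_zero_of_le hs]
  | case2 w ws hw ih =>
    have hsplit := List.takeWhile_append_dropWhile (p := pvValidTok) (l := ws)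
    have hg : ∀ x ∈ w :: ws.takeWhile pvValidTok, pvValidTok x = true := by
      intro x hx
      rcases List.mem_cons.1 hx with rfl | hx
      · exact hw
      · exact List.mem_takeWhile_imp hx
    have hr : ws.dropWhile pvValidTok = [] ∨
        ∃ r rs, ws.dropWhile pvValidTok = r :: rs ∧ pvValidTok r = false := by
      rcases hdw : ws.dropWhile pvValidTok with _ | ⟨r, rs⟩
      · exact Or.inl rfl
      · refine Or.inr ⟨r, rs, rfl, ?_⟩
        have := List.head_dropWhile_not (p := pvValidTok) (l := ws) (by simp [hdw])
        simpa [hdw] using this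
    calc pvChunksA (w :: ws) s
        = pvChunksA ((w :: ws.takeWhile pvValidTok) ++ ws.dropWhile pvValidTok) s := by
          rw [List.cons_append, hsplit]
      _ = pvWins (w :: ws.takeWhile pvValidTok) s ++ pvChunksA (ws.dropWhile pvValidTok) s :=
          pvSplit _ _ s hs hg hr
      _ = _ := by rw [ih, pvSegs, if_pos hw, List.flatMap_cons]
  | case3 w ws hw ih =>
    rw [pvChunksA_cons, pvSegs, if_neg hw, ← ih, if_neg]
    · simp
    · rintro ⟨hlen, hall⟩
      have hmem : w ∈ (w :: ws).take s := by
        rcases Nat.exists_eq_add_of_le hs with ⟨k, hk⟩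
        rw [hk, Nat.add_comm, List.take_succ_cons]
        exact List.mem_cons_self
      rw [List.all_eq_true] at hall
      have := hall w hmem
      simp [hw] at this

-- A's inner loop for one size, as a filtered window map
lemma pvInnerA (tokens : List String) (s : Nat) (acc : List String) :
    (PySem.List.pyRange 0 ((tokens.length : Int) - (s : Int) + 1) 1).foldl (fun phrases i =>
        let chunk := PySem.List.slice tokens (some i) (some (i + (s : Int)))
        if chunk.all pvValidTok then phrases ++ [PySem.Str.join " " chunk] else phrases)
      acc = acc ++ (pvChunksA tokens s).map (PySem.Str.join " ") := by
  have hto : ((tokens.length : Int) - (s : Int) + 1 - 0).toNat = tokens.length + 1 - s := by omega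
  rw [PySem.List.pyRange_one, List.foldl_map]
  simp only [zero_add, hto]
  have hfun : (fun (phrases : List String) (k : Nat) =>
        let chunk := PySem.List.slice tokens (some (k : Int)) (some ((k : Int) + (s : Int)))
        if chunk.all pvValidTok then phrases ++ [PySem.Str.join " " chunk] else phrases) =
      (fun (phrases : List String) (k : Nat) =>
        if ((tokens.drop k).take s).all pvValidTok then
          phrases ++ [PySem.Str.join " " ((tokens.drop k).take s)] else phrases) := by
    funext a k
    simp only [PySem.List.slice_natCast_add]
  rw [hfun,
    PySem.List.foldl_append_if (fun k => ((tokens.drop k).take s).all pvValidTok)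
      (fun k => PySem.Str.join " " ((tokens.drop k).take s))]
  rw [pvChunksA, pvWins, List.filter_map, List.map_map]
  rfl

-- B's inner loop for one size, over one segment
lemma pvInnerB (seg : List String) (s : Nat) (acc : List String) :
    (PySem.List.pyRange 0 ((seg.length : Int) - (s : Int) + 1) 1).foldl (fun phrases j =>
        phrases ++ [PySem.Str.join " " (PySem.List.slice seg (some j) (some (j + (s : Int))))])
      acc = acc ++ (pvWins seg s).map (PySem.Str.join " ") := by
  have hto : ((seg.length : Int) - (s : Int) + 1 - 0).toNat = seg.length + 1 - s := by omega
  rw [PySem.List.pyRange_one, List.foldl_map]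
  simp only [zero_add, hto, PySem.List.slice_natCast_add]
  rw [PySem.List.foldl_append_singleton_eq_map
    (fun k => PySem.Str.join " " ((seg.drop k).take s))]
  rw [pvWins, List.map_map]
  rfl

-- ===== VERDICT (by name: the statement is the Claim_ definition above) =====
theorem extract_phrases_py_spec : Claim_equal_extract_phrases_py := by
  intro tokens _
  unfold Spec_extract_phrases_py extract_phrases_py extract_phrases_py_alt
  simp only [PySem.List.len_eq]
  by_cases hlen : (tokens.length : Int) < 4
  · simp [hlen]
  · rw [if_neg hlen, if_neg hlen]
    have hsegs : (let p := tokens.foldl (fun (acc : List (List String) × List String) w =>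
          if pvValidTok w then (acc.1, acc.2 ++ [w])
          else if acc.2 ≠ [] then (acc.1 ++ [acc.2], ([] : List String))
          else acc) (([] : List (List String)), ([] : List String));
        if p.2 ≠ [] then p.1 ++ [p.2] else p.1) = pvSegs tokens := by
      refine (pvFold_segs tokens [] []).trans ?_
      rw [(pvSegsPre_spec tokens).1, List.nil_append]
    have hsize : ∀ (s : Nat) (acc : List String), 1 ≤ s →
        (PySem.List.pyRange 0 ((tokens.length : Int) - (s : Int) + 1) 1).foldl (fun phrases i =>
          let chunk := PySem.List.slice tokens (some i) (some (i + (s : Int)))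
          if chunk.all pvValidTok then phrases ++ [PySem.Str.join " " chunk] else phrases) acc =
        (pvSegs tokens).foldl (fun phrases seg =>
          (PySem.List.pyRange 0 ((seg.length : Int) - (s : Int) + 1) 1).foldl (fun phrases j =>
            phrases ++ [PySem.Str.join " " (PySem.List.slice seg (some j) (some (j + (s : Int))))])
            phrases) acc := by
      intro s acc hs
      rw [pvInnerA tokens s acc]
      have hfun : (fun (phrases : List String) (seg : List String) =>
            (PySem.List.pyRange 0 ((seg.length : Int) - (s : Int) + 1) 1).foldl (fun phrases j =>
              phrases ++ [PySem.Str.join " " (PySem.List.slice seg (some j) (some (j + (s : Int))))])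
              phrases) =
          (fun (phrases : List String) (seg : List String) =>
            phrases ++ (pvWins seg s).map (PySem.Str.join " ")) := by
        funext a seg
        exact pvInnerB seg s a
      rw [hfun, PySem.List.foldl_append_eq_flatMap, pvMain tokens s hs, List.map_flatMap]
    simp only [hsegs]
    have hsizeI : ∀ (sz : Int) (acc : List String), 1 ≤ sz →
        (PySem.List.pyRange 0 ((tokens.length : Int) - sz + 1) 1).foldl (fun phrases i =>
          let chunk := PySem.List.slice tokens (some i) (some (i + sz))
          if chunk.all pvValidTok then phrases ++ [PySem.Str.join " " chunk] else phrases) acc =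
        (pvSegs tokens).foldl (fun phrases seg =>
          (PySem.List.pyRange 0 ((seg.length : Int) - sz + 1) 1).foldl (fun phrases j =>
            phrases ++ [PySem.Str.join " " (PySem.List.slice seg (some j) (some (j + sz)))])
            phrases) acc := by
      intro sz acc hsz
      have hcast : sz = ((sz.toNat : Nat) : Int) := by omega
      rw [hcast]
      exact hsize sz.toNat acc (by omega)
    have houter : ∀ (szs : List Int) (acc : List String), (∀ s ∈ szs, 1 ≤ s) →
        szs.foldl (fun phrases size =>
          (PySem.List.pyRange 0 ((tokens.length : Int) - size + 1) 1).foldl (fun phrases i =>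
            let chunk := PySem.List.slice tokens (some i) (some (i + size))
            if chunk.all pvValidTok then phrases ++ [PySem.Str.join " " chunk] else phrases)
            phrases) acc =
        szs.foldl (fun phrases size =>
          (pvSegs tokens).foldl (fun phrases seg =>
            (PySem.List.pyRange 0 ((seg.length : Int) - size + 1) 1).foldl (fun phrases j =>
              phrases ++ [PySem.Str.join " " (PySem.List.slice seg (some j) (some (j + size)))])
              phrases)
            phrases) acc := by
      intro szs
      induction szs with
      | nil => intro acc _; rfl
      | cons sz t ih =>
        intro acc hall
        simp only [List.foldl_cons]
        rw [hsizeI sz acc (hall sz (by simp))]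
        exact ih _ (fun x hx => hall x (List.mem_cons_of_mem _ hx))
    exact houter [2, 3, 4, 5] [] (by decide)
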